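-- pv_equiv track=rewrite | github.com/CMUChimpsLab/playstore-scraper | core/analyzer/python_static_analyzer/namespaceanalyzer.py | GetDirectoryName
-- ===== SOURCE A (Python) =====
-- def GetDirectoryName (package_name):
--
--     tokens = []
--     i=0
--     for string in package_name.split ('/'):
--         if i==0:
--             string = string[1:]
--         tokens.append(string)
--         i = i + 1
--
--     lastToken = tokens.pop()
--     lastToken = lastToken[:-1]
--     tokens.append(lastToken)
--
--     new_package_name = ""
--     for string in tokens:
--         new_package_name += string
--         new_package_name += "."
--
--     #print new_package_name
--     return new_package_name
-- ===== SOURCE B (Python) =====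
-- def GetDirectoryName(package_name):
--     return package_name[1:-1].replace('/', '.') + '.'
-- ===== Notes on version B (the rewrite author's own statement) =====
-- stated objective: simpler
-- what changed: Replaces the split/index-loop/pop/rebuild-concat pipeline with one closed-form expression: drop the first and last character with a slice, turn slashes into dots with replace, append the trailing dot; Pre_ excludes strings that begin or end with '/', where A's token-wise strip hits an empty split-token and its value is an artefact of splitting before stripping.
-- outside the precondition, e.g. on GetDirectoryName('/a'): A returns '..', B returns '.'; on GetDirectoryName('a/'): A returns '..', B returns '.'; on GetDirectoryName('/'): A returns '..', B returns '.'
import Mathlib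
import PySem

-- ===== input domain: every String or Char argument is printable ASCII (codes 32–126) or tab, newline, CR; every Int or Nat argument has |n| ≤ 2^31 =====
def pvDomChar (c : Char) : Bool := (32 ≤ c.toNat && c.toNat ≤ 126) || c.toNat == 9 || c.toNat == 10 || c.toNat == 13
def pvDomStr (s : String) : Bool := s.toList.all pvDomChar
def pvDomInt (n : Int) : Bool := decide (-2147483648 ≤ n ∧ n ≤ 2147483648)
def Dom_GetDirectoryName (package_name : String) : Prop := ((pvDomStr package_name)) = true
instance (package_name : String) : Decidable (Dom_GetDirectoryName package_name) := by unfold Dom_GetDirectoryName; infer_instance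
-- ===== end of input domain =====

-- B replaces A's split/index-loop/pop/rebuild pipeline with one closed-form
-- slice+replace expression; objective: simpler.


-- ===== PORT A =====
-- Literal transliteration of A at the character-list level (String.ofList at the end):
-- split('/') = PySem.Chars.splitOn (non-empty literal separator, exact), string[1:] and
-- lastToken[:-1] = PySem.Chars.slice, pop()+append = getLast/dropLast/append, the two
-- for-loops = foldl over the same state.
def GetDirectoryName (package_name : String) : String :=
  let parts := PySem.Chars.splitOn package_name.toList ['/']
  -- for string in parts: if i == 0: string = string[1:]; tokens.append(string); i += 1
  let tokens := (parts.foldl (fun (st : List (List Char) × Nat) s =>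
      let s := if st.2 = 0 then PySem.Chars.slice s (some 1) none else s
      (st.1 ++ [s], st.2 + 1)) ([], 0)).1
  -- lastToken = tokens.pop(); lastToken = lastToken[:-1]; tokens.append(lastToken)
  let lastToken := tokens.getLastD []
  let tokens := tokens.dropLast
  let lastToken := PySem.Chars.slice lastToken none (some (-1))
  let tokens := tokens ++ [lastToken]
  -- new_package_name accumulation loop
  String.ofList (tokens.foldl (fun acc s => acc ++ s ++ ['.']) [])

-- ===== PORT B =====
-- Transliteration of Source B: package_name[1:-1] via Chars.slice, then replace + '.'.
def GetDirectoryName_alt (package_name : String) : String :=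
  String.ofList
    (PySem.Chars.replace
      (PySem.Chars.slice package_name.toList (some 1) (some (-1))) ['/'] ['.'] ++ ['.'])

-- ===== PRECONDITION & SPEC =====
-- Pre_ excludes strings that begin or end with '/': there A's strip operates on an
-- empty split-token (a no-op) and its value is an artefact of splitting before stripping,
-- while B strips the slash itself; e.g. A('/a') = '..' but B('/a') = '.'.
def Pre_GetDirectoryName (package_name : String) : Prop :=
  package_name.toList.head? ≠ some '/' ∧ package_name.toList.getLast? ≠ some '/'
instance (package_name : String) : Decidable (Pre_GetDirectoryName package_name) := by
  unfold Pre_GetDirectoryName; infer_instance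

def pvWitness_GetDirectoryName : String := "Lcom/foo/bar;"

def Spec_GetDirectoryName (package_name : String) (out : String) : Prop := out = GetDirectoryName_alt package_name
instance (package_name : String) (out : String) : Decidable (Spec_GetDirectoryName package_name out) := by unfold Spec_GetDirectoryName; infer_instance

-- ===== CLAIM (what is proved, stated in full; the proofs are below) =====
def Claim_equal_GetDirectoryName : Prop := ∀ (package_name : String), Dom_GetDirectoryName package_name → Pre_GetDirectoryName package_name → Spec_GetDirectoryName package_name (GetDirectoryName package_name)

-- ===== LEMMAS AND PROOFS =====

-- reference split on '/', structural
def mysplit : List Char → List (List Char)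
  | [] => [[]]
  | c :: rest =>
    if c = '/' then [] :: mysplit rest
    else match mysplit rest with
      | [] => [[c]]
      | q :: qs => (c :: q) :: qs

-- intercalate with separator '/' (resp. '.'), structural
def icS : List (List Char) → List Char
  | [] => []
  | [x] => x
  | x :: y :: ys => x ++ '/' :: icS (y :: ys)

def icD : List (List Char) → List Char
  | [] => []
  | [x] => x
  | x :: y :: ys => x ++ '.' :: icD (y :: ys)

theorem mysplit_ne_nil (l : List Char) : mysplit l ≠ [] := by
  cases l with
  | nil => simp [mysplit]
  | cons c rest =>
    simp only [mysplit]
    split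
    · simp
    · cases h : mysplit rest <;> simp

def modHead (f : List Char → List Char) : List (List Char) → List (List Char)
  | [] => []
  | x :: xs => f x :: xs

theorem splitOn_go_eq (l : List Char) : ∀ (fuel : Nat) (cur : List Char) (acc : List (List Char)),
    l.length < fuel →
    PySem.Chars.splitOn.go ['/'] fuel l cur acc
      = acc.reverse ++ modHead (cur.reverse ++ ·) (mysplit l) := by
  induction l with
  | nil =>
    intro fuel cur acc h
    cases fuel with
    | zero => omega
    | succ f => simp [PySem.Chars.splitOn.go, mysplit, modHead]
  | cons c rest ih =>
    intro fuel cur acc h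
    cases fuel with
    | zero => simp at h
    | succ f =>
      simp only [PySem.Chars.splitOn.go]
      by_cases hc : c = '/'
      · subst hc
        have hpre : List.isPrefixOf ['/'] ('/' :: rest) = true := by
          simp [List.isPrefixOf]
        simp only [hpre, if_pos, List.length_cons, List.length_nil, List.drop_succ_cons,
          List.drop_zero]
        rw [ih f [] (cur.reverse :: acc) (by simpa using Nat.lt_of_succ_lt_succ h)]
        simp only [mysplit, if_pos rfl]
        cases hms : mysplit rest with
        | nil => exact absurd hms (mysplit_ne_nil rest)
        | cons q qs => simp [modHead]
  -- non-separator head character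
      · have hpre : List.isPrefixOf ['/'] (c :: rest) = false := by
          simp [List.isPrefixOf]
          intro hcc; exact absurd hcc.symm hc
        simp only [hpre, Bool.false_eq_true, if_neg, not_false_iff]
        rw [ih f (c :: cur) acc (by simpa using Nat.lt_of_succ_lt_succ h)]
        simp only [mysplit, if_neg hc]
        cases hms : mysplit rest with
        | nil => exact absurd hms (mysplit_ne_nil rest)
        | cons q qs => simp [modHead]

theorem splitOn_eq (l : List Char) : PySem.Chars.splitOn l ['/'] = mysplit l := by
  unfold PySem.Chars.splitOn
  rw [splitOn_go_eq l (l.length + 1) [] [] (by omega)]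
  cases hms : mysplit l with
  | nil => exact absurd hms (mysplit_ne_nil l)
  | cons q qs => simp [modHead]

-- the character map '/' ↦ '.'
def dotmap (c : Char) : Char := if c = '/' then '.' else c

theorem replace_go_eq (l : List Char) : ∀ (fuel : Nat) (acc : List Char),
    l.length ≤ fuel →
    PySem.Chars.replace.go ['/'] ['.'] fuel l acc = acc.reverse ++ l.map dotmap := by
  induction l with
  | nil =>
    intro fuel acc h
    cases fuel <;> simp [PySem.Chars.replace.go]
  | cons c rest ih =>
    intro fuel acc h
    cases fuel with
    | zero => simp at h
    | succ f =>
      simp only [PySem.Chars.replace.go]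
      by_cases hc : c = '/'
      · subst hc
        have hpre : List.isPrefixOf ['/'] ('/' :: rest) = true := by
          simp [List.isPrefixOf]
        simp only [hpre, if_pos, List.length_cons, List.length_nil, List.drop_succ_cons,
          List.drop_zero]
        rw [ih f _ (by simpa using Nat.le_of_succ_le_succ h)]
        simp [dotmap]
      · have hpre : List.isPrefixOf ['/'] (c :: rest) = false := by
          simp [List.isPrefixOf]
          intro hcc; exact absurd hcc.symm hc
        simp only [hpre, Bool.false_eq_true, if_neg, not_false_iff]
        rw [ih f _ (by simpa using Nat.le_of_succ_le_succ h)]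
        simp [dotmap, hc]

theorem replace_eq (l : List Char) :
    PySem.Chars.replace l ['/'] ['.'] = l.map dotmap := by
  unfold PySem.Chars.replace
  simp only [List.isEmpty]
  exact replace_go_eq l l.length [] le_rfl

theorem icS_mysplit (l : List Char) : icS (mysplit l) = l := by
  induction l with
  | nil => simp [mysplit, icS]
  | cons c rest ih =>
    simp only [mysplit]
    by_cases hc : c = '/'
    · subst hc
      simp only [if_pos rfl]
      cases hms : mysplit rest with
      | nil => exact absurd hms (mysplit_ne_nil rest)
      | cons q qs =>
        rw [hms] at ih
        simp [icS, ih]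
    · simp only [if_neg hc]
      cases hms : mysplit rest with
      | nil => exact absurd hms (mysplit_ne_nil rest)
      | cons q qs =>
        rw [hms] at ih
        cases qs with
        | nil => simp [icS] at ih ⊢; simp [ih]
        | cons a as => simp [icS] at ih ⊢; simp [ih]

theorem mysplit_no_slash (l : List Char) : ∀ p ∈ mysplit l, '/' ∉ p := by
  induction l with
  | nil => simp [mysplit]
  | cons c rest ih =>
    simp only [mysplit]
    by_cases hc : c = '/'
    · subst hc; simp only [if_pos rfl]
      intro p hp
      rcases List.mem_cons.mp hp with h | h
      · simp [h]
      · exact ih p h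
    · simp only [if_neg hc]
      cases hms : mysplit rest with
      | nil => exact absurd hms (mysplit_ne_nil rest)
      | cons q qs =>
        intro p hp
        rcases List.mem_cons.mp hp with h | h
        · subst h
          intro hmem
          rcases List.mem_cons.mp hmem with h | h
          · exact hc h.symm
          · exact ih q (by rw [hms]; exact List.mem_cons_self) h
        · exact ih p (by rw [hms]; exact List.mem_cons.mpr (Or.inr h))

theorem map_dotmap_slashfree {p : List Char} (h : '/' ∉ p) : p.map dotmap = p := by
  induction p with
  | nil => simp
  | cons c rest ih =>
    have hc : c ≠ '/' := fun hh => h (hh ▸ List.mem_cons_self)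
    have hr : '/' ∉ rest := fun hh => h (List.mem_cons.mpr (Or.inr hh))
    simp [dotmap, hc, ih hr]

theorem icS_dotmap (qs : List (List Char)) (h : ∀ p ∈ qs, '/' ∉ p) :
    (icS qs).map dotmap = icD qs := by
  induction qs with
  | nil => simp [icS, icD]
  | cons q rest ih =>
    cases rest with
    | nil =>
      simp [icS, icD]
      exact map_dotmap_slashfree (h q List.mem_cons_self)
    | cons r rs =>
      have h1 : '/' ∉ q := h q List.mem_cons_self
      have ih' := ih (fun p hp => h p (List.mem_cons.mpr (Or.inr hp)))
      simp [icS, icD, map_dotmap_slashfree h1, dotmap, ih']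

-- the final accumulation loop
theorem foldl_dot (ts : List (List Char)) : ∀ acc,
    ts.foldl (fun acc s => acc ++ s ++ ['.']) acc = acc ++ (ts.map (· ++ ['.'])).flatten := by
  induction ts with
  | nil => simp
  | cons t rest ih => intro acc; simp [ih]

theorem flatten_dot (ts : List (List Char)) (h : ts ≠ []) :
    (ts.map (· ++ ['.'])).flatten = icD ts ++ ['.'] := by
  induction ts with
  | nil => exact absurd rfl h
  | cons t rest ih =>
    cases rest with
    | nil => simp [icD]
    | cons r rs =>
      have ih' := ih (by simp)
      simp [icD] at ih' ⊢
      simp [ih']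

-- the indexed token loop: once i ≥ 1 it just appends
theorem token_loop_tail (ps : List (List Char)) : ∀ (acc : List (List Char)) (i : Nat), 1 ≤ i →
    ((ps.foldl (fun (st : List (List Char) × Nat) s =>
        (st.1 ++ [if st.2 = 0 then s.tail else s], st.2 + 1))
      (acc, i)).1) = acc ++ ps := by
  induction ps with
  | nil => intro acc i hi; simp
  | cons p rest ih =>
    intro acc i hi
    have hne : ¬ (i = 0) := by omega
    simp only [List.foldl, hne, if_false, Bool.false_eq_true]
    rw [ih (acc ++ [p]) (i + 1) (by omega)]
    simp

def modLast (g : List Char → List Char) : List (List Char) → List (List Char)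
  | [] => []
  | [x] => [g x]
  | x :: y :: ys => x :: modLast g (y :: ys)

theorem dropLast_getLast_modLast (ts : List (List Char)) (h : ts ≠ []) (g : List Char → List Char) :
    ts.dropLast ++ [g (ts.getLastD [])] = modLast g ts := by
  induction ts with
  | nil => exact absurd rfl h
  | cons t rest ih =>
    cases rest with
    | nil => simp [modLast]
    | cons r rs =>
      have ih' := ih (by simp)
      simp [modLast] at ih' ⊢
      exact ih'

-- A's trims as plain list operations
def trim1 (l : List Char) : List Char := if l.take 1 ≠ ['/'] then l.tail else l
def trim2 (t : List Char) : List Char := if t.drop (t.length - 1) ≠ ['/'] then t.dropLast else t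

-- head trim: icS of the first-token-tailed split is trim1
theorem icS_modHead (l : List Char) :
    icS (modHead List.tail (mysplit l)) = trim1 l := by
  cases l with
  | nil => simp [mysplit, modHead, trim1, icS]
  | cons c rest =>
    by_cases hc : c = '/'
    · subst hc
      simp only [mysplit, modHead, List.tail]
      have h2 : icS ([] :: mysplit rest) = '/' :: rest := by
        have := icS_mysplit ('/' :: rest)
        simpa [mysplit] using this
      simp [trim1, h2]
    · simp only [mysplit, if_neg hc]
      cases hms : mysplit rest with
      | nil => exact absurd hms (mysplit_ne_nil rest)
      | cons q qs =>
        simp only [modHead, List.tail_cons]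
        have hq : icS (q :: qs) = rest := by
          rw [← hms]; exact icS_mysplit rest
        have hl : icS ((c :: q) :: qs) = c :: rest := by
          cases qs with
          | nil => simp [icS] at hq ⊢; exact hq
          | cons a as => simp [icS] at hq ⊢; simpa using hq
        simp [trim1, hc, hq]

theorem singleton_getLast {x : List Char} (hx : x ≠ []) :
    x.drop (x.length - 1) = [x.getLast hx] := by
  induction x with
  | nil => exact absurd rfl hx
  | cons c rest ih =>
    cases rest with
    | nil => simp
    | cons r rs =>
      have := ih (by simp)
      simpa [List.getLast, Nat.succ_sub_one] using this

theorem drop_len_sub_one_append (t s : List Char) (h : s ≠ []) :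
    (t ++ s).drop ((t ++ s).length - 1) = s.drop (s.length - 1) := by
  induction t with
  | nil => simp
  | cons c ts ih =>
    have hlen : 1 ≤ (ts ++ s).length := by
      have : 1 ≤ s.length := List.length_pos_iff.mpr h
      simp [List.length_append]; omega
    have h1 : (c :: (ts ++ s)).length - 1 = ((ts ++ s).length - 1) + 1 := by
      simp [List.length_append] at hlen ⊢; omega
    rw [List.cons_append, h1, List.drop_succ_cons, ih]

-- pushing trim2 through a '/'-separated prefix
theorem trim2_append (t s : List Char) : trim2 (t ++ '/' :: s) = t ++ '/' :: trim2 s := by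
  cases s with
  | nil =>
    have hx : (t ++ ['/']) ≠ [] := by simp
    have hlast : (t ++ ['/']).drop ((t ++ ['/']).length - 1) = ['/'] := by
      rw [singleton_getLast hx, List.getLast_concat]
    simp [trim2]
  | cons a as =>
    have hsplit : t ++ '/' :: a :: as = (t ++ ['/']) ++ a :: as := by simp
    have hlast : (t ++ '/' :: a :: as).drop ((t ++ '/' :: a :: as).length - 1)
        = (a :: as).drop ((a :: as).length - 1) :=
      hsplit ▸ drop_len_sub_one_append (t ++ ['/']) (a :: as) (by simp)
    have hdl : (t ++ '/' :: a :: as).dropLast = t ++ '/' :: (a :: as).dropLast := by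
      rw [hsplit, List.dropLast_append_of_ne_nil (by simp : (a :: as : List Char) ≠ [])]
      simp
    simp only [trim2, hlast, hdl]
    split <;> rfl

-- last trim: icS of the last-token-dropLasted list is trim2
theorem icS_modLast (ts : List (List Char)) (hne : ts ≠ [])
    (h : ∀ p ∈ ts, '/' ∉ p) :
    icS (modLast List.dropLast ts) = trim2 (icS ts) := by
  induction ts with
  | nil => exact absurd rfl hne
  | cons t rest ih =>
    cases rest with
    | nil =>
      simp only [modLast, icS]
      by_cases ht : t = []
      · subst ht; simp [trim2]
      · have hlast : t.drop (t.length - 1) = [t.getLast ht] := singleton_getLast ht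
        have hne' : t.getLast ht ≠ '/' := by
          intro heq
          exact h t List.mem_cons_self (heq ▸ List.getLast_mem ht)
        simp [trim2, hlast, hne']
    | cons r rs =>
      have ih' := ih (by simp) (fun p hp => h p (List.mem_cons.mpr (Or.inr hp)))
      have hrec : icS (t :: r :: rs) = t ++ '/' :: icS (r :: rs) := by simp [icS]
      have hrec2 : icS (modLast List.dropLast (t :: r :: rs))
          = t ++ '/' :: icS (modLast List.dropLast (r :: rs)) := by
        cases rs with
        | nil => simp [modLast, icS]
        | cons a as => simp [modLast, icS]
      rw [hrec, hrec2, ih', trim2_append]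

theorem tail_no_slash (l : List Char) :
    ∀ p ∈ modHead List.tail (mysplit l), '/' ∉ p := by
  have h := mysplit_no_slash l
  cases hms : mysplit l with
  | nil => simp [modHead]
  | cons q qs =>
    rw [hms] at h
    intro p hp
    rcases List.mem_cons.mp hp with h1 | h1
    · subst h1
      intro hmem
      exact h q List.mem_cons_self (List.mem_of_mem_tail hmem)
    · exact h p (List.mem_cons.mpr (Or.inr h1))

theorem modHead_ne_nil (l : List Char) : modHead List.tail (mysplit l) ≠ [] := by
  cases hms : mysplit l with
  | nil => exact absurd hms (mysplit_ne_nil l)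
  | cons q qs => simp [modHead]

theorem modLast_ne_nil (g : List Char → List Char) (ts : List (List Char)) (h : ts ≠ []) :
    modLast g ts ≠ [] := by
  cases ts with
  | nil => exact absurd rfl h
  | cons t rest => cases rest <;> simp [modLast]

theorem modLast_no_slash (ts : List (List Char)) (h : ∀ p ∈ ts, '/' ∉ p) :
    ∀ p ∈ modLast List.dropLast ts, '/' ∉ p := by
  induction ts with
  | nil => simp [modLast]
  | cons t rest ih =>
    cases rest with
    | nil =>
      simp only [modLast]
      intro p hp
      rcases List.mem_cons.mp hp with h1 | h1
      · subst h1
        intro hmem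
        exact h t List.mem_cons_self (List.dropLast_subset _ hmem)
      · simp at h1
    | cons r rs =>
      simp only [modLast]
      intro p hp
      rcases List.mem_cons.mp hp with h1 | h1
      · subst h1; exact h p List.mem_cons_self
      · exact ih (fun q hq => h q (List.mem_cons.mpr (Or.inr hq))) p h1

-- the B-side slice: xs[1:-1] is tail-then-dropLast
theorem slice_one_neg_one (xs : List Char) :
    PySem.List.slice xs (some 1) (some (-1)) = xs.tail.dropLast := by
  cases xs with
  | nil => simp [PySem.List.slice]
  | cons a t => simp [PySem.List.slice, List.dropLast_eq_take]

-- under Pre_ (no leading or trailing '/'), A's two trims are exactly tail + dropLast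
theorem trims_eq (l : List Char) (h1 : l.head? ≠ some '/') (h2 : l.getLast? ≠ some '/') :
    trim2 (trim1 l) = l.tail.dropLast := by
  have ht1 : trim1 l = l.tail := by
    cases l with
    | nil => simp [trim1]
    | cons a t =>
      have ha : a ≠ '/' := by simpa using h1
      simp [trim1, ha]
  rw [ht1]
  cases l with
  | nil => simp [trim2]
  | cons a t =>
    cases t with
    | nil => simp [trim2]
    | cons b u =>
      have hlast : (b :: u).getLast? ≠ some '/' := by
        simpa [List.getLast?_cons_cons] using h2
      have hg : (b :: u).getLast (by simp) ≠ '/' := by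
        intro heq
        exact hlast (by rw [List.getLast?_eq_some_getLast (by simp)]; simp [heq])
      have hd : (b :: u).drop ((b :: u).length - 1) = [(b :: u).getLast (by simp)] :=
        singleton_getLast (by simp)
      simp only [List.tail_cons, trim2, hd]
      simp [hg]

-- ===== VERDICT (by name: the statement is the Claim_ definition above) =====
theorem GetDirectoryName_spec : Claim_equal_GetDirectoryName := by
  intro s _ hpre
  obtain ⟨h1, h2⟩ := hpre
  unfold Spec_GetDirectoryName GetDirectoryName GetDirectoryName_alt
  simp only [splitOn_eq, replace_eq, PySem.Chars.slice_eq_listSlice,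
    PySem.List.slice_from_one, PySem.List.slice_to_neg_one, slice_one_neg_one]
  set l := s.toList with hl
  -- A's token loop = modHead tail
  have htok : ((mysplit l).foldl (fun (st : List (List Char) × Nat) s =>
      (st.1 ++ [if st.2 = 0 then s.tail else s], st.2 + 1)) ([], 0)).1
      = modHead List.tail (mysplit l) := by
    cases hms : mysplit l with
    | nil => exact absurd hms (mysplit_ne_nil l)
    | cons q qs =>
      simp only [List.foldl, if_true, List.nil_append, Nat.zero_add]
      rw [token_loop_tail qs [q.tail] 1 le_rfl]
      simp [modHead]
  rw [htok]
  have htsne := modHead_ne_nil l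
  have hsf := tail_no_slash l
  rw [dropLast_getLast_modLast (modHead List.tail (mysplit l)) htsne List.dropLast]
  have hqne : modLast List.dropLast (modHead List.tail (mysplit l)) ≠ [] :=
    modLast_ne_nil _ _ htsne
  have hqsf := modLast_no_slash (modHead List.tail (mysplit l)) hsf
  rw [foldl_dot, flatten_dot _ hqne, List.nil_append]
  have hicd : icD (modLast List.dropLast (modHead List.tail (mysplit l)))
      = (trim2 (trim1 l)).map dotmap := by
    rw [← icS_dotmap _ hqsf, icS_modLast _ htsne hsf, icS_modHead l]
  rw [hicd, trims_eq l h1 h2]
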